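-- pv_equiv track=rewrite | github.com/AMalkov07/Find-dna-strings | parse_csv.py | sort_and_group_given
-- ===== SOURCE A (Python) =====
-- def sort_and_group_given(grouped_by_chr_dict):
--     for key in grouped_by_chr_dict.keys():
--         tmp_arr = grouped_by_chr_dict[key]
--         tmp_arr = sorted(tmp_arr, key=lambda x: x["alignment_id"])
--         groups = [[tmp_arr[0]]]
--         last_id = tmp_arr[0]["alignment_id"]
--         for elem in tmp_arr[1:]:
--             if elem["alignment_id"] == last_id + 1:
--                 groups[-1].append(elem)
--             else:
--                 groups.append([elem])
--             last_id = elem["alignment_id"]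
--         grouped_by_chr_dict[key] = groups
--     return grouped_by_chr_dict
-- ===== SOURCE B (Python) =====
-- def sort_and_group_given(grouped_by_chr_dict):
--     # Same return value as the original on its domain; like the original, it
--     # updates the dict's values in place and returns the same dict object.
--     for key in grouped_by_chr_dict:
--         s = sorted(grouped_by_chr_dict[key], key=lambda x: x["alignment_id"])
--         groups = []
--         while s:
--             k = 1
--             while k < len(s) and s[k]["alignment_id"] == s[k - 1]["alignment_id"] + 1:
--                 k += 1
--             groups.append(s[:k])
--             s = s[k:]
--         grouped_by_chr_dict[key] = groups
--     return grouped_by_chr_dict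
-- ===== Notes on version B (the rewrite author's own statement) =====
-- stated objective: alternative
-- what changed: Replaces the fold that threads a last_id accumulator and mutates groups[-1] with a two-pointer scan: an inner loop finds the end of each consecutive-id run by comparing adjacent elements, and the run is cut out of the sorted list by slicing.
import Mathlib
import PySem

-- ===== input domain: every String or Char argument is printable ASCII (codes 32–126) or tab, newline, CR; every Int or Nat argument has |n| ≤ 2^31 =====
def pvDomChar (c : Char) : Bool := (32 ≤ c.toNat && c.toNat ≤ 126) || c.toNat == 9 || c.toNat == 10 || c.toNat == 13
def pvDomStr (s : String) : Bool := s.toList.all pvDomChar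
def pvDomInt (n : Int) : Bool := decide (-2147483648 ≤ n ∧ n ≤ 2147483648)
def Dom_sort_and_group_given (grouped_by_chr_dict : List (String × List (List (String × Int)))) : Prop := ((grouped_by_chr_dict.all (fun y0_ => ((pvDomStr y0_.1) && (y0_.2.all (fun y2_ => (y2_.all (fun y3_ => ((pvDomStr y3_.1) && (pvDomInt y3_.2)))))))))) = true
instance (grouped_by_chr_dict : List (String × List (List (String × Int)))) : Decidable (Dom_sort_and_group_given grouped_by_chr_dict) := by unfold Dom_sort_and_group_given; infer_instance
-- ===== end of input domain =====

-- B replaces A's last_id/groups[-1] fold with a two-pointer run scan plus slicing; same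
-- return value on Pre_. Both Pythons rebuild the dict's values in place and return the
-- same dict object; the theorems here are about the return value.

-- x["alignment_id"] (both Pythons); under Pre_ the key is present, so the default is never used
def pvAid (m : List (String × Int)) : Int :=
  ((PySem.Dict.mk m).get? "alignment_id").getD 0

-- ===== PORT A =====
-- groups[-1].append(elem)
def pvAppendLast (gs : List (List (List (String × Int)))) (e : List (String × Int)) :
    List (List (List (String × Int))) :=
  match gs with
  | [] => []
  | [g] => [g ++ [e]]
  | g :: rest => g :: pvAppendLast rest e

-- the body of A's per-key loop: sort, then fold over tmp_arr[1:] with (groups, last_id)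
def pvGroupsA (v : List (List (String × Int))) : List (List (List (String × Int))) :=
  match PySem.List.sorted v pvAid false with
  | [] => []   -- Python raises IndexError at tmp_arr[0]; excluded by Pre_
  | x :: rest =>
    (rest.foldl
      (fun st elem =>
        if pvAid elem = st.2 + 1 then (pvAppendLast st.1 elem, pvAid elem)
        else (st.1 ++ [[elem]], pvAid elem))
      ([[x]], pvAid x)).1

def sort_and_group_given (grouped_by_chr_dict : List (String × List (List (String × Int)))) :
    List (String × List (List (List (String × Int)))) :=
  grouped_by_chr_dict.map (fun kv => (kv.1, pvGroupsA kv.2))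

-- ===== PORT B =====
-- the inner while: advance k while s[k] has id s[k-1]'s id + 1
def pvScanB (s : List (List (String × Int))) (k : Nat) : Nat :=
  if h : k < s.length then
    if pvAid (PySem.List.pyGetD s (k : Int) []) =
        pvAid (PySem.List.pyGetD s ((k : Int) - 1) []) + 1
    then pvScanB s (k + 1) else k
  else k
termination_by s.length - k

-- pvScanB never moves k backwards (termination of the outer while below)
theorem pvScanB_ge (s : List (List (String × Int))) (k : Nat) : k ≤ pvScanB s k := by
  unfold pvScanB
  split
  · split
    · have := pvScanB_ge s (k + 1); omega
    · exact Nat.le_refl k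
  · exact Nat.le_refl k
termination_by s.length - k

-- the outer while: cut off s[:k], continue with s[k:]
def pvRunsB (s : List (List (String × Int))) (groups : List (List (List (String × Int)))) :
    List (List (List (String × Int))) :=
  if hs : s = [] then groups
  else
    pvRunsB (PySem.List.slice s (some ((pvScanB s 1 : Nat) : Int)) none)
      (groups ++ [PySem.List.slice s none (some ((pvScanB s 1 : Nat) : Int))])
termination_by s.length
decreasing_by
  have h1 : 1 ≤ pvScanB s 1 := pvScanB_ge s 1
  have hlen : s.length ≠ 0 := by simpa [List.length_eq_zero_iff] using hs
  rw [PySem.List.slice_from_natCast]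
  simp only [List.length_drop]
  omega

def sort_and_group_given_alt (grouped_by_chr_dict : List (String × List (List (String × Int)))) :
    List (String × List (List (List (String × Int)))) :=
  grouped_by_chr_dict.map (fun kv => (kv.1, pvRunsB (PySem.List.sorted kv.2 pvAid false) []))

-- ===== PRECONDITION & SPEC =====
-- Pre_ excludes exactly the inputs where Python A raises: an empty value list
-- (IndexError at tmp_arr[0]) or an element dict lacking "alignment_id" (KeyError in the sort key).
def Pre_sort_and_group_given (grouped_by_chr_dict : List (String × List (List (String × Int)))) : Prop :=
  ∀ kv ∈ grouped_by_chr_dict, kv.2 ≠ [] ∧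
    ∀ m ∈ kv.2, (PySem.Dict.mk m).contains "alignment_id" = true
instance (grouped_by_chr_dict : List (String × List (List (String × Int)))) : Decidable (Pre_sort_and_group_given grouped_by_chr_dict) := by unfold Pre_sort_and_group_given; infer_instance

def pvWitness_sort_and_group_given : (List (String × List (List (String × Int)))) :=
  [("chr1", [[("alignment_id", 2)], [("alignment_id", 1)], [("alignment_id", 5)]])]

def Spec_sort_and_group_given (grouped_by_chr_dict : List (String × List (List (String × Int)))) (out : List (String × List (List (List (String × Int))))) : Prop := out = sort_and_group_given_alt grouped_by_chr_dict
instance (grouped_by_chr_dict : List (String × List (List (String × Int)))) (out : List (String × List (List (List (String × Int))))) : Decidable (Spec_sort_and_group_given grouped_by_chr_dict out) := by unfold Spec_sort_and_group_given; infer_instance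

-- ===== CLAIM (what is proved, stated in full; the proofs are below) =====
def Claim_equal_sort_and_group_given : Prop := ∀ (grouped_by_chr_dict : List (String × List (List (String × Int)))), Dom_sort_and_group_given grouped_by_chr_dict → Pre_sort_and_group_given grouped_by_chr_dict → Spec_sort_and_group_given grouped_by_chr_dict (sort_and_group_given grouped_by_chr_dict)

-- ===== LEMMAS AND PROOFS =====

-- reference splitter both ports are reduced to: take one consecutive-id run, then recurse
def pvTakeRun (last : Int) : List (List (String × Int)) →
    List (List (String × Int)) × List (List (String × Int))
  | [] => ([], [])
  | y :: ys =>
    if pvAid y = last + 1 then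
      let p := pvTakeRun (pvAid y) ys
      (y :: p.1, p.2)
    else ([], y :: ys)

theorem pvTakeRun_append (last : Int) (xs : List (List (String × Int))) :
    (pvTakeRun last xs).1 ++ (pvTakeRun last xs).2 = xs := by
  induction xs generalizing last with
  | nil => simp [pvTakeRun]
  | cons y ys ih =>
    simp only [pvTakeRun]
    split
    · simpa using ih (pvAid y)
    · simp

theorem pvTakeRun_snd_le (last : Int) (xs : List (List (String × Int))) :
    (pvTakeRun last xs).2.length ≤ xs.length := by
  have h := congrArg List.length (pvTakeRun_append last xs)
  simp only [List.length_append] at h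
  omega

def pvRuns : List (List (String × Int)) → List (List (List (String × Int)))
  | [] => []
  | x :: xs =>
    let p := pvTakeRun (pvAid x) xs
    (x :: p.1) :: pvRuns p.2
termination_by s => s.length
decreasing_by
  have := pvTakeRun_snd_le (pvAid x) xs
  simp only [List.length_cons]
  omega

theorem pvAppendLast_append (gs0 : List (List (List (String × Int))))
    (g : List (List (String × Int))) (e : List (String × Int)) :
    pvAppendLast (gs0 ++ [g]) e = gs0 ++ [g ++ [e]] := by
  induction gs0 with
  | nil => rfl
  | cons a t ih =>
    cases t with
    | nil => simp [pvAppendLast]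
    | cons b u => simpa [pvAppendLast] using ih

-- A's fold over the tail, with any nonempty groups accumulator, is the run splitter
theorem pvFoldA_eq (xs : List (List (String × Int)))
    (gs0 : List (List (List (String × Int)))) (g : List (List (String × Int))) (last : Int) :
    (xs.foldl
      (fun st elem =>
        if pvAid elem = st.2 + 1 then (pvAppendLast st.1 elem, pvAid elem)
        else (st.1 ++ [[elem]], pvAid elem))
      (gs0 ++ [g], last)).1
    = gs0 ++ (g ++ (pvTakeRun last xs).1) :: pvRuns (pvTakeRun last xs).2 := by
  induction xs generalizing gs0 g last with
  | nil => simp [pvTakeRun, pvRuns]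
  | cons y ys ih =>
    simp only [List.foldl_cons, pvTakeRun]
    by_cases h : pvAid y = last + 1
    · rw [if_pos h, if_pos h, pvAppendLast_append]
      simpa using ih gs0 (g ++ [y]) (pvAid y)
    · rw [if_neg h, if_neg h]
      rw [ih (gs0 ++ [g]) [y] (pvAid y)]
      simp [pvRuns]

theorem pvGroupsA_eq_runs (v : List (List (String × Int)))
    (hv : PySem.List.sorted v pvAid false ≠ []) :
    pvGroupsA v = pvRuns (PySem.List.sorted v pvAid false) := by
  unfold pvGroupsA
  cases hs : PySem.List.sorted v pvAid false with
  | nil => exact absurd hs hv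
  | cons x rest =>
    have h1 := pvFoldA_eq rest [] [x] (pvAid x)
    simp only [List.nil_append] at h1
    simpa [pvRuns] using h1

-- the inner while's final k, in terms of the run splitter
theorem pvScanB_eq (s : List (List (String × Int))) (k : Nat) (h1 : 1 ≤ k) (h2 : k ≤ s.length) :
    pvScanB s k = k + ((pvTakeRun (pvAid (s.getD (k - 1) [])) (s.drop k)).1).length := by
  induction hn : s.length - k generalizing k with
  | zero =>
    have hk : ¬ k < s.length := by omega
    rw [pvScanB, dif_neg hk]
    have : s.drop k = [] := by
      rw [List.drop_eq_nil_iff]; omega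
    simp [this, pvTakeRun]
  | succ n ih =>
    have hk : k < s.length := by omega
    have hget : PySem.List.pyGetD s (k : Int) [] = s.getD k [] := by
      rw [PySem.List.pyGetD_natCast]
    have hgetp : PySem.List.pyGetD s ((k : Int) - 1) [] = s.getD (k - 1) [] := by
      have : ((k : Int) - 1) = ((k - 1 : Nat) : Int) := by omega
      rw [this, PySem.List.pyGetD_natCast]
    have hdrop : s.drop k = s[k] :: s.drop (k + 1) := List.drop_eq_getElem_cons hk
    have hgk : s.getD k [] = s[k] := List.getD_eq_getElem s [] hk
    rw [pvScanB, dif_pos hk, hget, hgetp, hgk]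
    by_cases hc : pvAid s[k] = pvAid (s.getD (k - 1) []) + 1
    · rw [if_pos hc, ih (k + 1) (by omega) (by omega) (by omega)]
      have hgk1 : s.getD (k + 1 - 1) [] = s[k] := by
        simpa using List.getD_eq_getElem s [] hk
      rw [hgk1, hdrop]
      simp only [pvTakeRun, if_pos hc]
      simp
      omega
    · rw [if_neg hc, hdrop]
      simp only [pvTakeRun, if_neg hc]
      simp

-- the outer while accumulates exactly the runs
theorem pvRunsB_eq (n : Nat) : ∀ (s : List (List (String × Int)))
    (groups : List (List (List (String × Int)))), s.length ≤ n →
    pvRunsB s groups = groups ++ pvRuns s := by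
  induction n with
  | zero =>
    intro s groups hs
    have : s = [] := by
      cases s with
      | nil => rfl
      | cons a t => simp at hs
    subst this
    simp [pvRunsB, pvRuns]
  | succ n ih =>
    intro s groups hs
    cases hsnil : s with
    | nil => simp [pvRunsB, pvRuns]
    | cons x xs =>
      rw [pvRunsB, dif_neg (by simp)]
      have hscan : pvScanB (x :: xs) 1 =
          1 + ((pvTakeRun (pvAid x) xs).1).length := by
        have h0 := pvScanB_eq (x :: xs) 1 (by omega) (by simp)
        simpa using h0
      set tr := pvTakeRun (pvAid x) xs with htr
      have happ : tr.1 ++ tr.2 = xs := pvTakeRun_append (pvAid x) xs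
      have htake : (x :: xs).take (1 + tr.1.length) = x :: tr.1 := by
        rw [List.take_cons (by omega)]
        congr 1
        · have : 1 + tr.1.length - 1 = tr.1.length := by omega
          rw [this, ← happ, List.take_left]
      have hdrop : (x :: xs).drop (1 + tr.1.length) = tr.2 := by
        rw [List.drop_cons (by omega)]
        have : 1 + tr.1.length - 1 = tr.1.length := by omega
        rw [this, ← happ, List.drop_left]
      rw [hscan, PySem.List.slice_from_natCast, PySem.List.slice_to_natCast,
        htake, hdrop]
      have hlen : tr.2.length ≤ n := by
        have := congrArg List.length happ
        simp only [List.length_append] at this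
        rw [hsnil] at hs
        simp only [List.length_cons] at hs
        omega
      rw [ih tr.2 (groups ++ [x :: tr.1]) hlen]
      simp [pvRuns, ← htr]

-- ===== VERDICT (by name: the statement is the Claim_ definition above) =====
theorem sort_and_group_given_spec : Claim_equal_sort_and_group_given := by
  intro d _ hpre
  unfold Spec_sort_and_group_given sort_and_group_given sort_and_group_given_alt
  apply List.map_congr_left
  intro kv hkv
  have hne : kv.2 ≠ [] := (hpre kv hkv).1
  have hsne : PySem.List.sorted kv.2 pvAid false ≠ [] := by
    rw [Ne, PySem.List.sorted_eq_nil_iff]; exact hne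
  rw [pvGroupsA_eq_runs kv.2 hsne,
    pvRunsB_eq (PySem.List.sorted kv.2 pvAid false).length _ [] (le_refl _)]
  simp
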